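-- pv_equiv track=rewrite | github.com/AdaCore/gnat-gdb-scripts | gnatdbg/utils.py | ada_string_repr
-- ===== SOURCE A (Python) =====
-- def ada_string_repr(string):
--     """
--     Format `string` as an Ada string literal.
--     """
--     chars = []
--     for c in string:
--         if c == '"':
--             chars.append('""')
--         elif c < ' ' or c > '~':
--             chars.append('["{:02x}"]'.format(ord(c)))
--         else:
--             chars.append(c)
--     return '"{}"'.format(''.join(chars))
-- ===== SOURCE B (Python) =====
-- def ada_string_repr(string):
--     """
--     Format `string` as an Ada string literal.
--     """
--     out = ['"']
--     i = 0
--     n = len(string)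
--     while i < n:
--         j = i
--         while j < n and ' ' <= string[j] <= '~' and string[j] != '"':
--             j += 1
--         out.append(string[i:j])  # a maximal run needing no escaping, copied at once
--         if j < n:
--             c = string[j]
--             out.append('""' if c == '"' else '["%02x"]' % ord(c))
--             j += 1
--         i = j
--     out.append('"')
--     return ''.join(out)
-- ===== Notes on version B (the rewrite author's own statement) =====
-- stated objective: alternative
-- what changed: Replaced A's char-by-char append loop with a two-pointer scan that slices out maximal runs needing no escaping and only handles escaped characters individually.
import Mathlib
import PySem

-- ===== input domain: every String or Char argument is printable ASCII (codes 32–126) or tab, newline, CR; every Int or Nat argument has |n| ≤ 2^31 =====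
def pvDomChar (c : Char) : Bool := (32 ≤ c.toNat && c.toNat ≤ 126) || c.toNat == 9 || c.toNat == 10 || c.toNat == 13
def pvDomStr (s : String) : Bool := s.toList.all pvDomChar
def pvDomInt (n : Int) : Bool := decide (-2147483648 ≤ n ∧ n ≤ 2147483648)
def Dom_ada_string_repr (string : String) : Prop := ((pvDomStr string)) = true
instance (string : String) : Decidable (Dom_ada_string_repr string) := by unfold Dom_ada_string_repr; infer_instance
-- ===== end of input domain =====

-- B replaces A's char-by-char loop by a two-pointer scan that copies maximal runs
-- needing no escaping at once (objective: alternative traversal, same exact output).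

-- shared helper: Python's '{:02x}'.format(n) — lowercase hex, zero-padded to width 2
def pvHexDigit (n : Nat) : Char := if n < 10 then Char.ofNat (48 + n) else Char.ofNat (87 + n)

def pvHex (n : Nat) : List Char :=
  if h : n < 16 then [pvHexDigit n]
  else pvHex (n / 16) ++ [pvHexDigit (n % 16)]
termination_by n
decreasing_by exact Nat.div_lt_self (by omega) (by omega)

def pvHex2 (n : Nat) : List Char :=
  let h := pvHex n
  if h.length < 2 then '0' :: h else h

-- ===== PORT A =====
-- A: for each char, append its escaped form to an accumulator list, then join
def pvEscA (acc : List Char) (c : Char) : List Char :=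
  if c == '"' then acc ++ ['"', '"']
  else if c < ' ' || '~' < c then acc ++ ('[' :: '"' :: (pvHex2 c.toNat ++ ['"', ']']))
  else acc ++ [c]

def ada_string_repr (string : String) : String :=
  let chars := string.toList.foldl pvEscA []
  String.mk ('"' :: (chars ++ ['"']))

-- ===== PORT B =====
def pvPlain (c : Char) : Bool := (' ' ≤ c && c ≤ '~') && c != '"'

def pvEscB (c : Char) : List Char :=
  if c == '"' then ['"', '"'] else '[' :: '"' :: (pvHex2 c.toNat ++ ['"', ']'])

-- B's outer while loop: copy the maximal plain run, escape one char, continue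
def pvRuns (l : List Char) : List Char :=
  match h : l.dropWhile pvPlain with
  | [] => l.takeWhile pvPlain
  | c :: rest => l.takeWhile pvPlain ++ pvEscB c ++ pvRuns rest
termination_by l.length
decreasing_by
  have hle := List.length_dropWhile_le pvPlain l
  rw [h] at hle; simp at hle; omega

def ada_string_repr_alt (string : String) : String :=
  String.mk ('"' :: (pvRuns string.toList ++ ['"']))

-- ===== PRECONDITION & SPEC =====
def Spec_ada_string_repr (string : String) (out : String) : Prop := out = ada_string_repr_alt string
instance (string : String) (out : String) : Decidable (Spec_ada_string_repr string out) := by unfold Spec_ada_string_repr; infer_instance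

-- ===== CLAIM (what is proved, stated in full; the proofs are below) =====
def Claim_equal_ada_string_repr : Prop := ∀ (string : String), Dom_ada_string_repr string → Spec_ada_string_repr string (ada_string_repr string)

-- ===== LEMMAS AND PROOFS =====
-- per-char escape as a pure function
def pvEsc1 (c : Char) : List Char :=
  if c == '"' then ['"', '"']
  else if c < ' ' || '~' < c then '[' :: '"' :: (pvHex2 c.toNat ++ ['"', ']'])
  else [c]

theorem pvEscA_eq (acc : List Char) (c : Char) : pvEscA acc c = acc ++ pvEsc1 c := by
  unfold pvEscA pvEsc1; split_ifs <;> simp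

theorem foldl_escA (l acc : List Char) :
    l.foldl pvEscA acc = acc ++ l.flatMap pvEsc1 := by
  induction l generalizing acc with
  | nil => simp
  | cons c cs ih => simp [List.foldl, pvEscA_eq, ih]

theorem pvEsc1_plain {c : Char} (h : pvPlain c = true) : pvEsc1 c = [c] := by
  unfold pvPlain at h
  simp only [Bool.and_eq_true, bne_iff_ne, decide_eq_true_eq] at h
  obtain ⟨⟨h1, h2⟩, h3⟩ := h
  unfold pvEsc1
  rw [if_neg (by simpa using h3), if_neg (by simp [not_lt.mpr h1, not_lt.mpr h2])]

theorem pvEsc1_not_plain {c : Char} (h : pvPlain c = false) : pvEsc1 c = pvEscB c := by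
  by_cases hq : c = '"'
  · simp [pvEsc1, pvEscB, hq]
  · have hnp : ¬(' ' ≤ c ∧ c ≤ '~') := by
      intro ⟨h1, h2⟩
      simp [pvPlain, h1, h2, hq] at h
    rcases not_and_or.mp hnp with h' | h' <;>
      simp [pvEsc1, pvEscB, hq, lt_of_not_ge h']

theorem flatMap_plain : ∀ (run : List Char), (∀ c ∈ run, pvPlain c = true) → run.flatMap pvEsc1 = run
  | [], _ => by simp
  | c :: cs, h => by
      simp only [List.flatMap_cons]
      rw [pvEsc1_plain (h c (by simp)), flatMap_plain cs (fun d hd => h d (by simp [hd]))]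
      simp

theorem pvRuns_eq (l : List Char) : pvRuns l = l.flatMap pvEsc1 := by
  fun_induction pvRuns l with
  | case1 l h =>
      conv_rhs => rw [← List.takeWhile_append_dropWhile (p := pvPlain) (l := l)]
      simp [h, flatMap_plain _ (fun c hc => List.mem_takeWhile_imp hc)]
  | case2 l c rest h ih =>
      have hc : pvPlain c = false := by
        have := List.head?_dropWhile_not pvPlain l
        rw [h] at this; simpa using this
      conv_rhs => rw [← List.takeWhile_append_dropWhile (p := pvPlain) (l := l)]
      rw [h]
      simp [flatMap_plain _ (fun d hd => List.mem_takeWhile_imp hd), ih, pvEsc1_not_plain hc]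

-- ===== VERDICT (by name: the statement is the Claim_ definition above) =====
theorem ada_string_repr_spec : Claim_equal_ada_string_repr := by
  intro string _
  unfold Spec_ada_string_repr ada_string_repr ada_string_repr_alt
  rw [foldl_escA, pvRuns_eq]
  simp
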